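-- pv_equiv track=rewrite | github.com/FuxmanBass-lab/HIV-MPRA | RetroEntropy/code/sld_vs_motifs.py | build_coord_maps
-- ===== SOURCE A (Python) =====
-- from typing import Dict, List, Optional, Tuple
--
-- def build_coord_maps(hxb2_aln: str, hxb2_start: int) -> Tuple[List[Optional[int]], Dict[int, int]]:
--     """Map alignment columns -> HXB2 coordinate, and coordinate -> column.
--
--     HXB2 coordinate increments on non-gap bases in HXB2.
--     """
--     col_to_coord: List[Optional[int]] = [None] * len(hxb2_aln)
--     coord_to_col: Dict[int, int] = {}
--
--     coord = hxb2_start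
--     for col, ch in enumerate(hxb2_aln):
--         if ch == "-":
--             col_to_coord[col] = None
--         else:
--             col_to_coord[col] = coord
--             coord_to_col[coord] = col
--             coord += 1
--     return col_to_coord, coord_to_col
-- ===== SOURCE B (Python) =====
-- def build_coord_maps(hxb2_aln, hxb2_start):
--     """Positional-arithmetic version: build the non-gap column index once,
--     then derive both maps from start+index instead of a running counter."""
--     nongap = [col for col, ch in enumerate(hxb2_aln) if ch != "-"]
--     coord_to_col = {hxb2_start + i: col for i, col in enumerate(nongap)}
--     col_to_coord = [None] * len(hxb2_aln)
--     for i, col in enumerate(nongap):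
--         col_to_coord[col] = hxb2_start + i
--     return col_to_coord, coord_to_col
-- ===== Notes on version B (the rewrite author's own statement) =====
-- stated objective: alternative
-- what changed: Replaces A's single stateful loop threading a running coord accumulator through list and dict updates with a pre-built list of non-gap column indices from which both maps are derived by positional arithmetic (coord = start + index).
import Mathlib
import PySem

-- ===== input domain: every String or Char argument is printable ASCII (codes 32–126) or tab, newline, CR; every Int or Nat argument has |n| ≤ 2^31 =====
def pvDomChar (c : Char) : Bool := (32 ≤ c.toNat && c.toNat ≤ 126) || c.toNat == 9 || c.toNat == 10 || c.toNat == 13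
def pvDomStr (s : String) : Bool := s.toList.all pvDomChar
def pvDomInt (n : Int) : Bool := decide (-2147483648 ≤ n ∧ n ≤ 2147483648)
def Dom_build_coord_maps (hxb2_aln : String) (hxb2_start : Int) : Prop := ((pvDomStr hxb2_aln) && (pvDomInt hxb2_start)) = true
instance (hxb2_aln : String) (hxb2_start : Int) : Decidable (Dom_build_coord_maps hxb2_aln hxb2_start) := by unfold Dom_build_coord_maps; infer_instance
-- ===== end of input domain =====

-- B replaces A's running-coord accumulator loop with a pre-built non-gap index list and
-- positional arithmetic (coord = start + index); objective: alternative decomposition.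


-- ===== PORT A =====
def build_coord_maps (hxb2_aln : String) (hxb2_start : Int) : List (Option Int) × (List (Int × Int)) :=
  let st := (PySem.List.enumerate hxb2_aln.toList 0).foldl
    (fun (st : List (Option Int) × PySem.Dict Int Int × Int) p =>
      if p.2 = '-' then (PySem.List.pySetD st.1 p.1 none, st.2.1, st.2.2)
      else (PySem.List.pySetD st.1 p.1 (some st.2.2), st.2.1.insert st.2.2 p.1, st.2.2 + 1))
    (List.replicate hxb2_aln.toList.length none, PySem.Dict.empty, hxb2_start)
  (st.1, st.2.1.items)

-- ===== PORT B =====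
def build_coord_maps_alt (hxb2_aln : String) (hxb2_start : Int) : List (Option Int) × (List (Int × Int)) :=
  let nongap := ((PySem.List.enumerate hxb2_aln.toList 0).filter (fun p => p.2 ≠ '-')).map (·.1)
  let coord_to_col := (PySem.List.enumerate nongap 0).map (fun q => (hxb2_start + q.1, q.2))
  let col_to_coord := (PySem.List.enumerate nongap 0).foldl
    (fun acc q => PySem.List.pySetD acc q.2 (some (hxb2_start + q.1)))
    (List.replicate hxb2_aln.toList.length (none : Option Int))
  (col_to_coord, coord_to_col)

-- ===== PRECONDITION & SPEC =====
def Spec_build_coord_maps (hxb2_aln : String) (hxb2_start : Int) (out : List (Option Int) × (List (Int × Int))) : Prop := out = build_coord_maps_alt hxb2_aln hxb2_start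
instance (hxb2_aln : String) (hxb2_start : Int) (out : List (Option Int) × (List (Int × Int))) : Decidable (Spec_build_coord_maps hxb2_aln hxb2_start out) := by unfold Spec_build_coord_maps; infer_instance

-- ===== CLAIM (what is proved, stated in full; the proofs are below) =====
def Claim_equal_build_coord_maps : Prop := ∀ (hxb2_aln : String) (hxb2_start : Int), Dom_build_coord_maps hxb2_aln hxb2_start → Spec_build_coord_maps hxb2_aln hxb2_start (build_coord_maps hxb2_aln hxb2_start)

-- ===== LEMMAS AND PROOFS =====

-- the non-gap column indices of l, enumerated from s
def pvNg (l : List Char) (s : Int) : List Int :=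
  ((PySem.List.enumerate l s).filter (fun p => p.2 ≠ '-')).map (·.1)

lemma pvNg_cons_gap (l : List Char) (s : Int) :
    pvNg ('-' :: l) s = pvNg l (s + 1) := by
  simp [pvNg, PySem.List.enumerate_cons]

lemma pvNg_cons_nongap (x : Char) (hx : x ≠ '-') (l : List Char) (s : Int) :
    pvNg (x :: l) s = s :: pvNg l (s + 1) := by
  simp [pvNg, PySem.List.enumerate_cons, hx]

-- enumerate shifted by s is enumerate from 0 with s added to each index
lemma enumerate_shift {α : Type} (xs : List α) (s t : Int) :
    PySem.List.enumerate xs (s + t) = (PySem.List.enumerate xs t).map (fun q => (s + q.1, q.2)) := by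
  induction xs generalizing t with
  | nil => simp [PySem.List.enumerate_nil]
  | cons x xs ih =>
      simp only [PySem.List.enumerate_cons, List.map_cons]
      rw [show s + t + 1 = s + (t + 1) by ring, ih (t + 1)]

-- xs.set is a no-op when the entry already holds the value
lemma set_eq_self_of_getElem? {α : Type} (xs : List α) (n : Nat) (v : α)
    (h : xs[n]? = some v) : xs.set n v = xs := by
  induction xs generalizing n with
  | nil => simp at h
  | cons y ys ih =>
      cases n with
      | zero => simp at h; simp [h]
      | succ m => simp only [List.getElem?_cons_succ] at h; simp [List.set_cons_succ, ih m h]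

-- A's loop, in closed form over the non-gap index list (gap writes are no-ops by H)
lemma foldA_eq (l : List Char) (s : Int) (hs : 0 ≤ s) (acc : List (Option Int))
    (H : ∀ j : Nat, l[j]? = some '-' → acc[s.toNat + j]? = some none)
    (d : PySem.Dict Int Int) (c : Int) :
    (PySem.List.enumerate l s).foldl
      (fun (st : List (Option Int) × PySem.Dict Int Int × Int) p =>
        if p.2 = '-' then (PySem.List.pySetD st.1 p.1 none, st.2.1, st.2.2)
        else (PySem.List.pySetD st.1 p.1 (some st.2.2), st.2.1.insert st.2.2 p.1, st.2.2 + 1))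
      (acc, d, c)
    = ( (PySem.List.enumerate (pvNg l s) c).foldl
          (fun a q => PySem.List.pySetD a q.2 (some q.1)) acc,
        (PySem.List.enumerate (pvNg l s) c).foldl
          (fun dd q => dd.insert q.1 q.2) d,
        c + ((pvNg l s).length : Int) ) := by
  induction l generalizing s acc d c with
  | nil => simp [PySem.List.enumerate_nil, pvNg]
  | cons x l ih =>
      have hs1 : (0:Int) ≤ s + 1 := by omega
      have htn : (s + 1).toNat = s.toNat + 1 := by omega
      rw [PySem.List.enumerate_cons, List.foldl_cons]
      by_cases hx : x = '-'
      · subst hx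
        have hset : PySem.List.pySetD acc s (none : Option Int) = acc := by
          rw [PySem.List.pySetD_of_nonneg acc none hs]
          exact set_eq_self_of_getElem? acc s.toNat none (by simpa using H 0 (by simp))
        rw [if_pos rfl, pvNg_cons_gap]
        have H' : ∀ j : Nat, l[j]? = some '-' → acc[(s+1).toNat + j]? = some none := by
          intro j hj
          have := H (j + 1) (by simpa using hj)
          rw [htn]
          simpa [Nat.add_assoc, Nat.add_comm 1 j] using this
        have := ih (s + 1) hs1 acc H' d c
        simpa [hset] using this
      · rw [pvNg_cons_nongap x hx l s, PySem.List.enumerate_cons]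
        simp only [if_neg hx, List.foldl_cons, List.length_cons]
        have H' : ∀ j : Nat, l[j]? = some '-' →
            (PySem.List.pySetD acc s (some c))[(s+1).toNat + j]? = some none := by
          intro j hj
          rw [PySem.List.pySetD_of_nonneg acc (some c) hs, htn]
          rw [List.getElem?_set_ne (by omega)]
          have := H (j + 1) (by simpa using hj)
          simpa [Nat.add_assoc, Nat.add_comm 1 j] using this
        rw [ih (s + 1) hs1 (PySem.List.pySetD acc s (some c)) H' (d.insert c s) (c + 1)]
        refine Prod.ext rfl (Prod.ext rfl ?_)
        push_cast
        ring

lemma ng_fst_nodup (xs : List Int) (c : Int) :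
    ((PySem.List.enumerate xs c).map (fun q => (q.1, q.2))).map (fun p => p.1) |>.Nodup := by
  have h := PySem.List.pairwise_lt_enumerate xs c
  have : ((PySem.List.enumerate xs c).map (fun q => (q.1, q.2))).map (fun p => p.1)
      = (PySem.List.enumerate xs c).map (·.1) := by simp
  rw [this]
  exact List.Pairwise.map _ (fun a b hab => ne_of_lt hab) h

theorem build_coord_maps_spec : Claim_equal_build_coord_maps := by
  intro s start _
  unfold Spec_build_coord_maps build_coord_maps build_coord_maps_alt
  rw [foldA_eq s.toList 0 (by omega) _
    (by intro j hj
        have hjlen : j < s.toList.length := by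
          rcases Nat.lt_or_ge j s.toList.length with h | h
          · exact h
          · rw [List.getElem?_eq_none h] at hj; cases hj
        simp only [Int.toNat_zero, Nat.zero_add, List.getElem?_replicate, if_pos hjlen])
    PySem.Dict.empty start]
  have hshift := enumerate_shift (pvNg s.toList 0) start 0
  rw [add_zero] at hshift
  refine Prod.ext ?_ ?_
  · -- list component
    show (PySem.List.enumerate (pvNg s.toList 0) start).foldl
        (fun a q => PySem.List.pySetD a q.2 (some q.1)) _ = _
    rw [hshift, List.foldl_map]
    rfl
  · -- dict component: fresh strictly increasing keys append
    show ((PySem.List.enumerate (pvNg s.toList 0) start).foldl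
        (fun dd q => dd.insert q.1 q.2) PySem.Dict.empty).items = _
    have hfresh : ∀ q ∈ PySem.List.enumerate (pvNg s.toList 0) start,
        (PySem.Dict.empty : PySem.Dict Int Int).contains ((fun (q : Int × Int) => q.1) q) = false := by
      intro q _; exact PySem.Dict.contains_empty _
    have hnodup : ((PySem.List.enumerate (pvNg s.toList 0) start).map (fun (q : Int × Int) => q.1)).Nodup := by
      have := ng_fst_nodup (pvNg s.toList 0) start
      simpa using this
    have := PySem.Dict.items_foldl_insert_fresh
      (l := PySem.List.enumerate (pvNg s.toList 0) start)
      (k := fun (q : Int × Int) => q.1) (v := fun q => q.2)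
      (d := PySem.Dict.empty) hfresh hnodup
    rw [this]
    simp only [PySem.Dict.empty, List.nil_append]
    rw [hshift, List.map_map]
    rfl
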